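-- pv_equiv track=rewrite | github.com/OseungKwon/Solved-Algorithm | Programmers/Stack & Queue/주식 가격.py | solution
-- ===== SOURCE A (Python) =====
-- def solution(prices):
--     answer = [0 for _ in range(len(prices))]
--     stack=[]
--     for i in range(len(prices)):
--         while len(stack)!=0 and prices[i]<prices[stack[len(stack) -1]]:
--             temp = stack.pop()
--             answer[temp] = i-temp
--         stack.append(i)
--
--     while len(stack):
--         temp = stack.pop()
--         answer[temp] = len(prices) - temp - 1
--     return answer
-- ===== SOURCE B (Python) =====
-- def solution(prices):
--     n = len(prices)
--     answer = []
--     for i in range(n):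
--         c = 0
--         for j in range(i + 1, n):
--             c += 1
--             if prices[j] < prices[i]:
--                 break
--         answer.append(c)
--     return answer
-- ===== Notes on version B (the rewrite author's own statement) =====
-- stated objective: simpler
-- what changed: Replaces the monotonic index stack plus in-place answer updates by a plain nested scan: for each i count forward until the first strictly lower price (or the end).
import Mathlib
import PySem

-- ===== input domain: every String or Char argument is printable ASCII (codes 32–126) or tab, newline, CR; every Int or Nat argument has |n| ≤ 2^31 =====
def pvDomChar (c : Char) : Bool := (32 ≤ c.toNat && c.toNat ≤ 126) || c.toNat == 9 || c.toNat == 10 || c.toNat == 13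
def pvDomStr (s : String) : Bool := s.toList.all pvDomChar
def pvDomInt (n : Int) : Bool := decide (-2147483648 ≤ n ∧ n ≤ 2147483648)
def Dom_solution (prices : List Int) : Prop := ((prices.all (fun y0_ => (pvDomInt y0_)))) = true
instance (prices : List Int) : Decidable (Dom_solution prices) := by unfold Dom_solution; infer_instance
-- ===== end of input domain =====

-- B replaces A's monotonic index stack with a plain nested forward scan per index (simpler, not faster).


-- ===== PORT A =====
-- prices[i] for an index that is always in range on every reachable call (so getD's default is never used)
def solGetI (xs : List Int) (i : Nat) : Int := xs.getD i 0

-- the inner 'while' pop loop; the stack is kept top-at-head (Python appends/pops at the end)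
def solPop (prices : List Int) (i : Nat) : List Nat → List Int → List Nat × List Int
  | [], answer => ([], answer)
  | t :: rest, answer =>
    if solGetI prices i < solGetI prices t then
      solPop prices i rest (answer.set t ((i : Int) - (t : Int)))
    else (t :: rest, answer)

-- the trailing drain 'while len(stack)'
def solDrain (n : Nat) : List Nat → List Int → List Int
  | [], answer => answer
  | t :: rest, answer => solDrain n rest (answer.set t ((n : Int) - (t : Int) - 1))

def solution (prices : List Int) : List Int :=
  let n := prices.length
  let st := (List.range n).foldl
    (fun (st : List Nat × List Int) i =>
      let r := solPop prices i st.1 st.2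
      (i :: r.1, r.2)) ([], List.replicate n 0)
  solDrain n st.1 st.2

-- ===== PORT B =====
-- the inner 'for j' loop of Source B: count 1 per step, stop after the first strictly lower price
def altCount (x : Int) : List Int → Int
  | [] => 0
  | q :: rest => if q < x then 1 else 1 + altCount x rest

def solution_alt (prices : List Int) : List Int :=
  (List.range prices.length).map (fun i => altCount (solGetI prices i) (prices.drop (i + 1)))

-- ===== PRECONDITION & SPEC =====
def Spec_solution (prices : List Int) (out : List Int) : Prop := out = solution_alt prices
instance (prices : List Int) (out : List Int) : Decidable (Spec_solution prices out) := by unfold Spec_solution; infer_instance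

-- ===== CLAIM (what is proved, stated in full; the proofs are below) =====
def Claim_equal_solution : Prop := ∀ (prices : List Int), Dom_solution prices → Spec_solution prices (solution prices)

-- ===== LEMMAS AND PROOFS =====

-- the per-index value B computes
def solF (prices : List Int) (j : Nat) : Int :=
  altCount (solGetI prices j) (prices.drop (j + 1))

-- loop invariant of A's main loop, after the first k iterations
def solINV (prices : List Int) (k : Nat) (stack : List Nat) (answer : List Int) : Prop :=
  answer.length = prices.length ∧
  stack.Pairwise (· > ·) ∧
  (∀ j ∈ stack, j < k) ∧
  (∀ j ∈ stack, ∀ t, j < t → t < prices.length → t < k → solGetI prices j ≤ solGetI prices t) ∧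
  (∀ j, j < k → j ∉ stack → answer.getD j 0 = solF prices j)

theorem solGetD_set (l : List Int) (t j : Nat) (v : Int) :
    (l.set t v).getD j 0 = if j = t ∧ t < l.length then v else l.getD j 0 := by
  by_cases hj : t = j
  · subst hj
    by_cases ht : t < l.length
    · simp [List.getD, ht]
    · simp [List.getD, ht]
  · have hj' : ¬ (j = t) := fun h => hj h.symm
    simp [List.getD, hj, hj']

theorem altCount_all_ge (x : Int) (l : List Int) (h : ∀ q ∈ l, x ≤ q) :
    altCount x l = (l.length : Int) := by
  induction l with
  | nil => simp [altCount]
  | cons q rest ih =>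
    have hq := h q (by simp)
    simp only [altCount, if_neg (not_lt.mpr hq)]
    rw [ih (fun q hq => h q (by simp [hq]))]
    simp only [List.length_cons]
    push_cast; omega

theorem altCount_append (x : Int) (l1 l2 : List Int) (y : Int)
    (h1 : ∀ q ∈ l1, x ≤ q) (hy : y < x) :
    altCount x (l1 ++ y :: l2) = (l1.length : Int) + 1 := by
  induction l1 with
  | nil => simp [altCount, hy]
  | cons q rest ih =>
    have hq := h1 q (by simp)
    simp only [List.cons_append, altCount, if_neg (not_lt.mpr hq)]
    rw [ih (fun q hq => h1 q (by simp [hq]))]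
    simp only [List.length_cons]
    push_cast; omega

theorem solGetI_eq (prices : List Int) (i : Nat) (h : i < prices.length) :
    solGetI prices i = prices[i] := by
  simp [solGetI, List.getD_eq_getElem?_getD, List.getElem?_eq_getElem h]

-- members of the window (t, i) of prices
theorem mem_window (prices : List Int) (t m : Nat) (q : Int)
    (hq : q ∈ (prices.drop (t + 1)).take m) :
    ∃ u, t < u ∧ u < t + 1 + m ∧ u < prices.length ∧ q = solGetI prices u := by
  obtain ⟨a, ha, rfl⟩ := List.mem_iff_getElem.1 hq
  have hlen : a < prices.length - (t + 1) := by
    have := ha; simp [List.length_take, List.length_drop] at this; omega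
  have hm : a < m := by
    have := ha; simp [List.length_take, List.length_drop] at this; omega
  refine ⟨t + 1 + a, by omega, by omega, by omega, ?_⟩
  rw [solGetI_eq prices (t + 1 + a) (by omega)]
  simp [List.getElem_take, List.getElem_drop]

-- B's count when the first strictly lower price is at index i
theorem solF_first (prices : List Int) (t i : Nat) (hti : t < i) (hi : i < prices.length)
    (hno : ∀ u, t < u → u < i → u < prices.length → solGetI prices t ≤ solGetI prices u)
    (hdrop : solGetI prices i < solGetI prices t) :
    solF prices t = (i : Int) - (t : Int) := by
  have hsplit : prices.drop (t + 1) =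
      (prices.drop (t + 1)).take (i - (t + 1)) ++ solGetI prices i :: prices.drop (i + 1) := by
    have h1 : List.drop (i - (t + 1)) (prices.drop (t + 1)) = prices.drop i := by
      rw [List.drop_drop]; congr 1; omega
    have h2 : prices.drop i = prices[i] :: prices.drop (i + 1) :=
      List.drop_eq_getElem_cons hi
    have h3 := List.take_append_drop (i - (t + 1)) (prices.drop (t + 1))
    rw [h1, h2] at h3
    rw [solGetI_eq prices i hi]
    exact h3.symm
  unfold solF
  rw [hsplit, altCount_append _ _ _ _ ?_ hdrop]
  · have hlen : ((prices.drop (t + 1)).take (i - (t + 1))).length = i - (t + 1) := by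
      simp [List.length_take, List.length_drop]; omega
    rw [hlen]; omega
  · intro q hq
    obtain ⟨u, hu1, hu2, hu3, rfl⟩ := mem_window prices t (i - (t + 1)) q hq
    exact hno u hu1 (by omega) hu3

-- B's count when no later price is strictly lower
theorem solF_none (prices : List Int) (t : Nat) (ht : t < prices.length)
    (hno : ∀ u, t < u → u < prices.length → solGetI prices t ≤ solGetI prices u) :
    solF prices t = (prices.length : Int) - (t : Int) - 1 := by
  unfold solF
  rw [altCount_all_ge _ _ ?_]
  · simp [List.length_drop]; omega
  · intro q hq
    obtain ⟨a, ha, rfl⟩ := List.mem_iff_getElem.1 hq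
    have hlen : a < prices.length - (t + 1) := by simpa using ha
    have := hno (t + 1 + a) (by omega) (by omega)
    rw [solGetI_eq prices (t + 1 + a) (by omega)] at this
    simpa [List.getElem_drop] using this

theorem chain_gt_head (t : Nat) (rest : List Nat) (h : (t :: rest).Pairwise (· > ·)) :
    ∀ j ∈ rest, j < t := fun _ hj => List.rel_of_pairwise_cons h hj

-- the pop loop preserves the invariant and leaves a stack all of whose prices are ≤ prices[i]
theorem solPop_ok (prices : List Int) (i : Nat) (hi : i < prices.length) :
    ∀ stack answer, solINV prices i stack answer →
      (solPop prices i stack answer).2.length = prices.length ∧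
      (solPop prices i stack answer).1 <:+ stack ∧
      (∀ j ∈ (solPop prices i stack answer).1, solGetI prices j ≤ solGetI prices i) ∧
      (∀ j, j < i → j ∉ (solPop prices i stack answer).1 →
        (solPop prices i stack answer).2.getD j 0 = solF prices j) := by
  intro stack
  induction stack with
  | nil =>
    intro answer hinv
    obtain ⟨h1, h2, h3, h4, h5⟩ := hinv
    exact ⟨h1, List.suffix_refl _, by simp [solPop], fun j hj _ => h5 j hj (by simp)⟩
  | cons t rest ih =>
    intro answer hinv
    obtain ⟨h1, h2, h3, h4, h5⟩ := hinv
    have htmem : t ∈ t :: rest := by simp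
    have hti : t < i := h3 t htmem
    by_cases hc : solGetI prices i < solGetI prices t
    · -- pop t, set answer[t] := i - t, recurse
      have hFt : solF prices t = (i : Int) - (t : Int) :=
        solF_first prices t i hti hi (fun u hu1 hu2 hu3 => h4 t htmem u hu1 hu3 hu2) hc
      have hinv' : solINV prices i rest (answer.set t ((i : Int) - (t : Int))) := by
        refine ⟨by simp [h1], h2.of_cons, fun j hj => h3 j (by simp [hj]),
          fun j hj u hu1 hu2 hu3 => h4 j (by simp [hj]) u hu1 hu2 hu3, ?_⟩
        intro j hj hjn
        rw [solGetD_set]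
        rcases eq_or_ne j t with rfl | hne
        · rw [if_pos ⟨rfl, by omega⟩, hFt]
        · rw [if_neg (by tauto)]
          exact h5 j hj (by simp [hne, hjn])
      have := ih (answer.set t ((i : Int) - (t : Int))) hinv'
      simp only [solPop, if_pos hc]
      exact ⟨this.1, this.2.1.trans (List.suffix_cons _ _), this.2.2⟩
    · -- stop: prices[t] ≤ prices[i]
      simp only [solPop, if_neg hc]
      refine ⟨h1, List.suffix_refl _, ?_, fun j hj hjn => h5 j hj hjn⟩
      intro j hj
      rcases List.mem_cons.1 hj with rfl | hjr
      · omega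
      · have hjt : j < t := chain_gt_head t rest h2 j hjr
        have : solGetI prices j ≤ solGetI prices t := h4 j hj t hjt (by omega) hti
        omega

-- one iteration of the main loop takes the invariant from k = i to k = i + 1
theorem solStep_ok (prices : List Int) (i : Nat) (hi : i < prices.length)
    (stack : List Nat) (answer : List Int) (hinv : solINV prices i stack answer) :
    solINV prices (i + 1) (i :: (solPop prices i stack answer).1)
      (solPop prices i stack answer).2 := by
  obtain ⟨hlen, hsfx, hle, hset⟩ := solPop_ok prices i hi stack answer hinv
  obtain ⟨h1, h2, h3, h4, h5⟩ := hinv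
  have hmem : ∀ j ∈ (solPop prices i stack answer).1, j ∈ stack := fun j hj => hsfx.mem hj
  have hchain : (solPop prices i stack answer).1.Pairwise (· > ·) := h2.sublist hsfx.sublist
  refine ⟨hlen, ?_, ?_, ?_, ?_⟩
  · refine List.pairwise_cons.2 ⟨?_, hchain⟩
    intro b hb
    exact h3 b (hmem b hb)
  · intro j hj
    rcases List.mem_cons.1 hj with rfl | hjr
    · omega
    · have := h3 j (hmem j hjr); omega
  · intro j hj u hu1 hu2 hu3
    rcases List.mem_cons.1 hj with rfl | hjr
    · omega
    · rcases Nat.lt_or_ge u i with h | h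
      · exact h4 j (hmem j hjr) u hu1 hu2 h
      · have : u = i := by omega
        subst this
        exact hle j hjr
  · intro j hj hjn
    have hji : j < i := by
      rcases Nat.lt_or_ge j i with h | h
      · exact h
      · exfalso; exact hjn (by simp [List.mem_cons]; omega)
    exact hset j hji (fun hin => hjn (by simp [hin]))

-- the main foldl maintains the invariant
theorem solFoldl_ok (prices : List Int) : ∀ k, k ≤ prices.length →
    solINV prices k
      ((List.range k).foldl (fun (st : List Nat × List Int) i =>
        let r := solPop prices i st.1 st.2
        (i :: r.1, r.2)) ([], List.replicate prices.length 0)).1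
      ((List.range k).foldl (fun (st : List Nat × List Int) i =>
        let r := solPop prices i st.1 st.2
        (i :: r.1, r.2)) ([], List.replicate prices.length 0)).2 := by
  intro k
  induction k with
  | zero =>
    intro _
    exact ⟨by simp, by simp, by simp, by simp, by omega⟩
  | succ k ih =>
    intro hk
    have hkk : k < prices.length := by omega
    have hinv := ih (by omega)
    rw [List.range_succ, List.foldl_append]
    exact solStep_ok prices k hkk _ _ hinv

-- the drain sets every remaining index to its B-value
theorem solDrain_ok (prices : List Int) :
    ∀ stack answer, solINV prices prices.length stack answer →
      (solDrain prices.length stack answer).length = prices.length ∧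
      (∀ j, j < prices.length →
        (solDrain prices.length stack answer).getD j 0 = solF prices j) := by
  intro stack
  induction stack with
  | nil =>
    intro answer hinv
    obtain ⟨h1, _, _, _, h5⟩ := hinv
    exact ⟨h1, fun j hj => h5 j hj (by simp)⟩
  | cons t rest ih =>
    intro answer hinv
    obtain ⟨h1, h2, h3, h4, h5⟩ := hinv
    have htmem : t ∈ t :: rest := by simp
    have ht : t < prices.length := h3 t htmem
    have hFt : solF prices t = (prices.length : Int) - (t : Int) - 1 :=
      solF_none prices t ht (fun u hu1 hu2 => h4 t htmem u hu1 hu2 hu2)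
    have hinv' : solINV prices prices.length rest
        (answer.set t ((prices.length : Int) - (t : Int) - 1)) := by
      refine ⟨by simp [h1], h2.of_cons, fun j hj => h3 j (by simp [hj]),
        fun j hj u hu1 hu2 hu3 => h4 j (by simp [hj]) u hu1 hu2 hu3, ?_⟩
      intro j hj hjn
      rw [solGetD_set]
      rcases eq_or_ne j t with rfl | hne
      · rw [if_pos ⟨rfl, by omega⟩, hFt]
      · rw [if_neg (by tauto)]
        exact h5 j hj (by simp [hne, hjn])
    exact ih _ hinv'

theorem solution_eq_alt (prices : List Int) : solution prices = solution_alt prices := by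
  unfold solution
  obtain ⟨hlen, hval⟩ := solDrain_ok prices _ _
    (solFoldl_ok prices prices.length (le_refl _))
  apply List.ext_getElem
  · simpa [solution_alt] using hlen
  · intro j hj1 hj2
    have hjn : j < prices.length := by simpa [solution_alt] using hj2
    have := hval j hjn
    rw [List.getD_eq_getElem?_getD, List.getElem?_eq_getElem hj1] at this
    simp only [Option.getD_some] at this
    rw [this]
    simp [solution_alt, solF]

-- ===== VERDICT (by name: the statement is the Claim_ definition above) =====
theorem solution_spec : Claim_equal_solution := by
  intro prices _
  unfold Spec_solution
  exact solution_eq_alt prices
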